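-- pv_equiv track=rewrite | github.com/peterparkersol123-cmyk/pfp_agent | src/content/generator.py | _parse_thread
-- ===== SOURCE A (Python) =====
-- from typing import Optional, List, Dict, Any
--
-- def _parse_thread(content: str, expected_count: int) -> List[str]:
--     """
--     Parse thread content into individual tweets.
--
--     Args:
--         content: Raw thread content
--         expected_count: Expected number of tweets
--
--     Returns:
--         List of individual tweets
--     """
--     tweets = []
--
--     # Try parsing numbered format (1/, 2/, etc.)
--     lines = content.strip().split('\n')
--     current_tweet = []
--
--     for line in lines:
--         line = line.strip()
--         if not line:
--             continue
--
--         # Check if line starts with number/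
--         if any(line.startswith(f"{i}/") or line.startswith(f"{i}.") for i in range(1, expected_count + 2)):
--             if current_tweet:
--                 tweet_text = ' '.join(current_tweet)
--                 # Remove numbering
--                 tweet_text = tweet_text.split('/', 1)[-1].strip()
--                 tweet_text = tweet_text.split('.', 1)[-1].strip()
--                 tweets.append(tweet_text)
--                 current_tweet = []
--
--             current_tweet.append(line)
--         else:
--             current_tweet.append(line)
--
--     # Add last tweet
--     if current_tweet:
--         tweet_text = ' '.join(current_tweet)
--         tweet_text = tweet_text.split('/', 1)[-1].strip()
--         tweet_text = tweet_text.split('.', 1)[-1].strip()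
--         tweets.append(tweet_text)
--
--     # If parsing failed, try splitting by newlines
--     if len(tweets) < expected_count:
--         tweets = [line.strip() for line in lines if line.strip()]
--
--     return tweets[:expected_count]
-- ===== SOURCE B (Python) =====
-- from typing import List
--
--
-- def _parse_thread(content: str, expected_count: int) -> List[str]:
--     """Split thread content into tweets by grouping non-empty lines at numbered
--     boundaries (span-based segmentation instead of a stateful accumulator)."""
--
--     def is_numbered(line: str) -> bool:
--         return any(line.startswith(f"{i}/") or line.startswith(f"{i}.")
--                    for i in range(1, expected_count + 2))
--
--     def strip_numbering(text: str) -> str: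
--         text = text.split('/', 1)[-1].strip()
--         return text.split('.', 1)[-1].strip()
--
--     lines = content.strip().split('\n')
--     nonempty = [line.strip() for line in lines if line.strip()]
--
--     tweets = []
--     rest = nonempty
--     while rest:
--         head, tail = rest[0], rest[1:]
--         k = 0
--         while k < len(tail) and not is_numbered(tail[k]):
--             k += 1
--         tweets.append(strip_numbering(' '.join([head] + tail[:k])))
--         rest = tail[k:]
--
--     if len(tweets) < expected_count:
--         tweets = nonempty
--
--     return tweets[:expected_count]
-- ===== Notes on version B (the rewrite author's own statement) =====
-- stated objective: alternative
-- what changed: Replaces A's single stateful accumulator loop (strip/skip inline, flush-on-boundary, trailing flush) by computing the non-empty stripped lines once and segmenting them by spans: each group is the head line plus the following run of non-numbered lines, emitted directly; the fallback reuses the precomputed non-empty list instead of recomputing it.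
import Mathlib
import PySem

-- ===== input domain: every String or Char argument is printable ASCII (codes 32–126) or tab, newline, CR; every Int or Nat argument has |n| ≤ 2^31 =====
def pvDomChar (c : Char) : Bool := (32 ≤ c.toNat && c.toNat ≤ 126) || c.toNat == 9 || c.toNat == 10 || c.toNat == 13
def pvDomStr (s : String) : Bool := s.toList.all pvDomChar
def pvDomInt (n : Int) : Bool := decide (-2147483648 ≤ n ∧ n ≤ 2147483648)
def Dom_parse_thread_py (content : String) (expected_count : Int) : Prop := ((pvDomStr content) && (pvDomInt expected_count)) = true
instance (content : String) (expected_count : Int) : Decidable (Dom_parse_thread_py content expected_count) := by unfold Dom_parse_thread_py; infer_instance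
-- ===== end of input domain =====

-- B replaces A's stateful accumulator loop by span-based segmentation of the
-- precomputed non-empty stripped lines (objective: alternative decomposition).


-- ===== PORT A =====
-- tweet_text.split('/', 1)[-1].strip() ; then the same with '.'
-- (split? never returns none for a non-empty separator; the [-1] index is total on the
-- non-empty result, ported with pyGet? and a default that is never reached)
def pvStripNumA (t : String) : String :=
  let t1 := PySem.Str.strip (((PySem.List.pyGet? ((PySem.Str.splitMax? t "/" 1).getD [t]) (-1))).getD t)
  PySem.Str.strip (((PySem.List.pyGet? ((PySem.Str.splitMax? t1 "." 1).getD [t1]) (-1))).getD t1)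

def parse_thread_py (content : String) (expected_count : Int) : List String :=
  let lines := (PySem.Str.split? (PySem.Str.strip content) "\n").getD []
  -- the loop: state = (tweets, current_tweet)
  let st := lines.foldl (fun (st : List String × List String) line =>
      let line := PySem.Str.strip line
      if line = "" then st
      else if (PySem.List.pyRange 1 (expected_count + 2) 1).any (fun i =>
          PySem.Str.startswith line (PySem.Int.toStr i ++ "/") ||
          PySem.Str.startswith line (PySem.Int.toStr i ++ ".")) then
        if st.2 ≠ [] then (st.1 ++ [pvStripNumA (PySem.Str.join " " st.2)], [line])
        else (st.1, st.2 ++ [line])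
      else (st.1, st.2 ++ [line])) ([], [])
  let tweets := if st.2 ≠ [] then st.1 ++ [pvStripNumA (PySem.Str.join " " st.2)] else st.1
  let tweets := if (tweets.length : Int) < expected_count then
      ((lines.filter (fun l => !(PySem.Str.strip l == ""))).map PySem.Str.strip)
    else tweets
  PySem.List.slice tweets none (some expected_count)

-- ===== PORT B =====
def pvIsNumberedB (expected_count : Int) (line : String) : Bool :=
  (PySem.List.pyRange 1 (expected_count + 2) 1).any (fun i =>
    PySem.Str.startswith line (PySem.Int.toStr i ++ "/") ||
    PySem.Str.startswith line (PySem.Int.toStr i ++ "."))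

def pvStripNumB (t : String) : String :=
  let t1 := PySem.Str.strip (((PySem.List.pyGet? ((PySem.Str.splitMax? t "/" 1).getD [t]) (-1))).getD t)
  PySem.Str.strip (((PySem.List.pyGet? ((PySem.Str.splitMax? t1 "." 1).getD [t1]) (-1))).getD t1)

-- the inner while-loops of Source B: peel one group = head + following non-numbered run
def pvSegmentsB (expected_count : Int) : List String → List String
  | [] => []
  | x :: xs =>
    pvStripNumB (PySem.Str.join " " (x :: xs.takeWhile (fun l => !pvIsNumberedB expected_count l)))
      :: pvSegmentsB expected_count (xs.dropWhile (fun l => !pvIsNumberedB expected_count l))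
termination_by xs => xs.length
decreasing_by
  simpa using Nat.lt_succ_of_le (List.length_dropWhile_le _ _)

def parse_thread_py_alt (content : String) (expected_count : Int) : List String :=
  let lines := (PySem.Str.split? (PySem.Str.strip content) "\n").getD []
  let nonempty := (lines.filter (fun l => !(PySem.Str.strip l == ""))).map PySem.Str.strip
  let tweets := pvSegmentsB expected_count nonempty
  let tweets := if (tweets.length : Int) < expected_count then nonempty else tweets
  PySem.List.slice tweets none (some expected_count)

-- ===== PRECONDITION & SPEC =====
def Spec_parse_thread_py (content : String) (expected_count : Int) (out : List String) : Prop := out = parse_thread_py_alt content expected_count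
instance (content : String) (expected_count : Int) (out : List String) : Decidable (Spec_parse_thread_py content expected_count out) := by unfold Spec_parse_thread_py; infer_instance

-- ===== CLAIM (what is proved, stated in full; the proofs are below) =====
def Claim_equal_parse_thread_py : Prop := ∀ (content : String) (expected_count : Int), Dom_parse_thread_py content expected_count → Spec_parse_thread_py content expected_count (parse_thread_py content expected_count)

-- ===== LEMMAS AND PROOFS =====

-- A's loop body on an already-stripped, non-empty line
def pvStep (ec : Int) (st : List String × List String) (line : String) : List String × List String :=
  if pvIsNumberedB ec line then
    if st.2 ≠ [] then (st.1 ++ [pvStripNumB (PySem.Str.join " " st.2)], [line])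
    else (st.1, st.2 ++ [line])
  else (st.1, st.2 ++ [line])

def pvFinal (st : List String × List String) : List String :=
  if st.2 ≠ [] then st.1 ++ [pvStripNumB (PySem.Str.join " " st.2)] else st.1

-- A's fold over the raw lines equals the stripped step-fold over the non-empty stripped lines
theorem pvFold_eq_core (ec : Int) (lines : List String) (st : List String × List String) :
    lines.foldl (fun (st : List String × List String) line =>
      let line := PySem.Str.strip line
      if line = "" then st
      else if (PySem.List.pyRange 1 (ec + 2) 1).any (fun i =>
          PySem.Str.startswith line (PySem.Int.toStr i ++ "/") ||
          PySem.Str.startswith line (PySem.Int.toStr i ++ ".")) then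
        if st.2 ≠ [] then (st.1 ++ [pvStripNumA (PySem.Str.join " " st.2)], [line])
        else (st.1, st.2 ++ [line])
      else (st.1, st.2 ++ [line])) st
    = ((lines.filter (fun l => !(PySem.Str.strip l == ""))).map PySem.Str.strip).foldl (pvStep ec) st := by
  induction lines generalizing st with
  | nil => rfl
  | cons l ls ih =>
    rw [List.foldl_cons, List.filter_cons]
    by_cases h : PySem.Str.strip l = ""
    · rw [if_neg (by simp [h] : ¬ ((!(PySem.Str.strip l == "")) = true)), ← ih st]
      congr 1
      show (if PySem.Str.strip l = "" then st else pvStep ec st (PySem.Str.strip l)) = st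
      exact if_pos h
    · rw [if_pos (by simp [h] : (!(PySem.Str.strip l == "")) = true), List.map_cons,
        List.foldl_cons, ← ih (pvStep ec st (PySem.Str.strip l))]
      congr 1
      show (if PySem.Str.strip l = "" then st else pvStep ec st (PySem.Str.strip l))
          = pvStep ec st (PySem.Str.strip l)
      exact if_neg h

-- the core invariant: finalizing the step-fold yields the span segmentation
theorem pvCore_segments (ec : Int) (xs : List String) :
    ∀ (tweets cur : List String),
      pvFinal (xs.foldl (pvStep ec) (tweets, cur)) =
        tweets ++ (if _h : cur = [] then pvSegmentsB ec xs
          else pvStripNumB (PySem.Str.join " "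
                (cur ++ xs.takeWhile (fun l => !pvIsNumberedB ec l)))
              :: pvSegmentsB ec (xs.dropWhile (fun l => !pvIsNumberedB ec l))) := by
  induction xs with
  | nil =>
    intro tweets cur
    by_cases h : cur = []
    · simp [h, pvFinal, pvSegmentsB]
    · simp [h, pvFinal, pvSegmentsB]
  | cons x xs ih =>
    intro tweets cur
    by_cases h : cur = []
    · subst h
      by_cases hp : pvIsNumberedB ec x
      · simp only [List.foldl_cons, pvStep, hp, if_true, ne_eq, not_true_eq_false, if_false,
          List.nil_append]
        rw [ih tweets [x]]
        simp [pvSegmentsB]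
      · simp only [List.foldl_cons, pvStep, hp, Bool.false_eq_true, if_false, List.nil_append]
        rw [ih tweets [x]]
        simp [pvSegmentsB]
    · by_cases hp : pvIsNumberedB ec x
      · simp only [List.foldl_cons, pvStep, hp, if_true, ne_eq, h, not_false_eq_true, if_true]
        rw [ih (tweets ++ [pvStripNumB (PySem.Str.join " " cur)]) [x]]
        have htw : (x :: xs).takeWhile (fun l => !pvIsNumberedB ec l) = [] := by
          simp [hp]
        have hdw : (x :: xs).dropWhile (fun l => !pvIsNumberedB ec l) = x :: xs := by
          simp [hp]
        simp [htw, hdw, pvSegmentsB]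
      · simp only [List.foldl_cons, pvStep, hp, Bool.false_eq_true, if_false]
        rw [ih tweets (cur ++ [x])]
        have htw : (x :: xs).takeWhile (fun l => !pvIsNumberedB ec l)
            = x :: xs.takeWhile (fun l => !pvIsNumberedB ec l) := by
          simp [hp]
        have hdw : (x :: xs).dropWhile (fun l => !pvIsNumberedB ec l)
            = xs.dropWhile (fun l => !pvIsNumberedB ec l) := by
          simp [hp]
        simp [h, htw, hdw]

-- ===== VERDICT (by name: the statement is the Claim_ definition above) =====
theorem parse_thread_py_spec : Claim_equal_parse_thread_py := by
  intro content ec _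
  unfold Spec_parse_thread_py parse_thread_py parse_thread_py_alt
  simp only []
  rw [pvFold_eq_core]
  rw [show ∀ st : List String × List String,
      (if st.2 ≠ [] then st.1 ++ [pvStripNumA (PySem.Str.join " " st.2)] else st.1) = pvFinal st
    from fun st => rfl]
  rw [pvCore_segments ec _ [] []]
  simp
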